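-- pv_equiv track=rewrite | github.com/Anushree1291/Leetcode-solutions | Copy Set Bits in Range - GFG/copy-set-bits-in-range.py | setSetBit
-- ===== SOURCE A (Python) =====
-- def setSetBit(x, y, l, r):
--     b_y = list("{:032b}".format(y))
--     b_x = list("{:032b}".format(x))
--     for i in range(32-r,33-l):
--         if b_y[i] == '1':
--             b_x[i] = '1'
--     res = "".join(b_x)
--     return(int(res,2))
-- ===== SOURCE B (Python) =====
-- def setSetBit(x, y, l, r):
--     if l > r:
--         return x
--     mask = (1 << r) - (1 << (l - 1))
--     return x | (y & mask)
-- ===== Notes on version B (the rewrite author's own statement) =====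
-- stated objective: idiomatic
-- what changed: Replaces A's formatting of x and y into 32-character binary strings and a per-bit copy loop by the closed-form bitwise computation x | (y & mask) with mask = (1<<r) - (1<<(l-1)) (returning x directly when the range l..r is empty).
-- outside the precondition, e.g. on setSetBit(-5, 3, 1, 2): A returns -7, B returns -5; on setSetBit(0, 1, 2, 34): A returns 1, B returns 0
import Mathlib
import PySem

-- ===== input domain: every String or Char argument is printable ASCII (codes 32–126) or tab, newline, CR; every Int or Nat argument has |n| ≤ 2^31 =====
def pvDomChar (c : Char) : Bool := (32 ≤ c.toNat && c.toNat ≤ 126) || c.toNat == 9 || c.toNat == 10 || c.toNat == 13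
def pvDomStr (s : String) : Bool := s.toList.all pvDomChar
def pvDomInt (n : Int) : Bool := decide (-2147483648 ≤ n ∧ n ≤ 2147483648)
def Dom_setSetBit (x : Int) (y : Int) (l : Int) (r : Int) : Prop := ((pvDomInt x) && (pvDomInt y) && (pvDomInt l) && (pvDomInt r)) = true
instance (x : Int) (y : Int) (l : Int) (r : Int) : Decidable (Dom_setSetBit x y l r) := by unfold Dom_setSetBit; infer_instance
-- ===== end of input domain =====

-- B replaces A's 32-character binary-string formatting and per-bit copy loop by the closed-form
-- bitwise computation x | (y & mask); proved equal on the natural 32-bit domain stated in Pre_.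

-- ===== PORT A =====

-- binary digits of a natural number, most significant first ('' for 0) — hand port of the digit
-- production inside "{:032b}".format, exact for naturals
def pvNatBin (n : Nat) : List Char :=
  if h : n = 0 then []
  else pvNatBin (n / 2) ++ [if n % 2 = 1 then '1' else '0']
decreasing_by exact Nat.div_lt_self (Nat.pos_of_ne_zero h) (by norm_num)

-- zero-pad on the left to width w (keeps the string if already longer) — the 0w part of "{:0wb}"
def pvPad (w : Nat) (s : List Char) : List Char := List.replicate (w - s.length) '0' ++ s

-- list("{:032b}".format(n)): hand port, exact for |n| ≤ 2^31 (negative n: '-' then the magnitude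
-- padded so the total width is 32)
def pvFmt032 (n : Int) : List Char :=
  if n < 0 then '-' :: pvPad 31 (pvNatBin (-n).toNat) else pvPad 32 (pvNatBin n.toNat)

def pvBinDigitVal (c : Char) : Nat := if c = '1' then 1 else 0

-- int(s, 2): hand port, exact for an optional '-' followed by binary digits
def pvParseBin (s : List Char) : Int :=
  if s.head? = some '-' then
    -(Int.ofNat (s.tail.foldl (fun a c => a * 2 + pvBinDigitVal c) 0))
  else Int.ofNat (s.foldl (fun a c => a * 2 + pvBinDigitVal c) 0)

def setSetBit (x : Int) (y : Int) (l : Int) (r : Int) : Int :=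
  let b_y := pvFmt032 y
  let b_x := pvFmt032 x
  -- for i in range(32-r, 33-l): if b_y[i] == '1': b_x[i] = '1'
  -- (indexing via pyGetD/pySetD; in-range on every input admitted by Pre_)
  let b_x := (PySem.List.pyRange (32 - r) (33 - l)).foldl
    (fun bx i => if PySem.List.pyGetD b_y i ' ' = '1' then PySem.List.pySetD bx i '1' else bx) b_x
  pvParseBin b_x

-- ===== PORT B =====
def setSetBit_alt (x : Int) (y : Int) (l : Int) (r : Int) : Int :=
  if l > r then x
  else
    -- mask = (1 << r) - (1 << (l - 1)); exact since Pre_ gives 0 ≤ l - 1 and 0 ≤ r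
    let mask : Int := 2 ^ r.toNat - 2 ^ (l - 1).toNat
    Int.lor x (Int.land y mask)

-- ===== PRECONDITION & SPEC =====
-- Pre_ restricts to the function's natural domain — non-negative 32-bit x and y with bit
-- positions 1 ≤ l ≤ r ≤ 32 — plus the whole empty-range case l > r (where A returns x for any
-- arguments); outside it A either raises IndexError or its fixed-width string formatting of
-- negative numbers / negative list indices governs the result rather than the 32-bit contract.
def Pre_setSetBit (x : Int) (y : Int) (l : Int) (r : Int) : Prop :=
  r < l ∨ (1 ≤ l ∧ l ≤ r ∧ r ≤ 32 ∧ 0 ≤ x ∧ 0 ≤ y)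
instance (x : Int) (y : Int) (l : Int) (r : Int) : Decidable (Pre_setSetBit x y l r) := by
  unfold Pre_setSetBit; infer_instance

def pvWitness_setSetBit : Int × Int × Int × Int := (5, 3, 1, 2)

def Spec_setSetBit (x : Int) (y : Int) (l : Int) (r : Int) (out : Int) : Prop := out = setSetBit_alt x y l r
instance (x : Int) (y : Int) (l : Int) (r : Int) (out : Int) : Decidable (Spec_setSetBit x y l r out) := by unfold Spec_setSetBit; infer_instance

-- ===== CLAIM (what is proved, stated in full; the proofs are below) =====
def Claim_equal_setSetBit : Prop := ∀ (x : Int) (y : Int) (l : Int) (r : Int), Dom_setSetBit x y l r → Pre_setSetBit x y l r → Spec_setSetBit x y l r (setSetBit x y l r)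

-- ===== LEMMAS AND PROOFS =====

-- value of a binary digit string (no sign)
def pvVal (s : List Char) : Nat := s.foldl (fun a c => a * 2 + pvBinDigitVal c) 0

-- width-k MSB-first binary digits of a (truncated to k bits)
def pvWide : Nat → Nat → List Char
  | 0, _ => []
  | k + 1, a => pvWide k (a / 2) ++ [if a % 2 = 1 then '1' else '0']

theorem pvVal_pad (w : Nat) (s : List Char) : pvVal (pvPad w s) = pvVal s := by
  unfold pvPad pvVal
  rw [List.foldl_append]
  have h0 : ∀ k : Nat, (List.replicate k '0').foldl (fun a c => a * 2 + pvBinDigitVal c) 0 = 0 := by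
    intro k
    induction k with
    | zero => simp
    | succ k ih =>
      rw [List.replicate_succ, List.foldl_cons]
      simpa [pvBinDigitVal] using ih
  rw [h0]

theorem pvVal_append_singleton (s : List Char) (c : Char) :
    pvVal (s ++ [c]) = pvVal s * 2 + pvBinDigitVal c := by
  simp [pvVal, List.foldl_append]

theorem pvVal_natBin (n : Nat) : pvVal (pvNatBin n) = n := by
  induction n using Nat.strong_induction_on with
  | _ n ih =>
    by_cases h : n = 0
    · subst h; simp [pvNatBin, pvVal]
    · rw [pvNatBin, dif_neg h, pvVal_append_singleton,
        ih (n / 2) (Nat.div_lt_self (Nat.pos_of_ne_zero h) (by norm_num))]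
      have h2 : n % 2 = 0 ∨ n % 2 = 1 := by omega
      rcases h2 with h2 | h2 <;> simp [h2, pvBinDigitVal] <;> omega

theorem pvNatBin_chars (n : Nat) : ∀ c ∈ pvNatBin n, c = '0' ∨ c = '1' := by
  induction n using Nat.strong_induction_on with
  | _ n ih =>
    by_cases h : n = 0
    · subst h; simp [pvNatBin]
    · rw [pvNatBin, dif_neg h]
      intro c hc
      rcases List.mem_append.mp hc with hc | hc
      · exact ih (n / 2) (Nat.div_lt_self (Nat.pos_of_ne_zero h) (by norm_num)) c hc
      · simp only [List.mem_singleton] at hc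
        subst hc
        split <;> simp

theorem pvPad_natBin_chars (w n : Nat) : ∀ c ∈ pvPad w (pvNatBin n), c = '0' ∨ c = '1' := by
  intro c hc
  rcases List.mem_append.mp hc with hc | hc
  · left; exact List.eq_of_mem_replicate hc
  · exact pvNatBin_chars n c hc

theorem pvParseBin_eq_val (s : List Char) (h : ∀ c ∈ s, c = '0' ∨ c = '1') :
    pvParseBin s = Int.ofNat (pvVal s) := by
  have hne : s.head? ≠ some '-' := by
    cases s with
    | nil => simp
    | cons c t =>
      rcases h c (by simp) with hc | hc <;> subst hc <;> simp
  unfold pvParseBin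
  rw [if_neg hne]
  rfl

theorem pvWide_length (k a : Nat) : (pvWide k a).length = k := by
  induction k generalizing a with
  | zero => simp [pvWide]
  | succ k ih => simp [pvWide, ih]

theorem pvWide_getElem? (k : Nat) : ∀ (a j : Nat), j < k →
    (pvWide k a)[j]? = some (if a.testBit (k - 1 - j) then '1' else '0') := by
  induction k with
  | zero => intro a j hj; omega
  | succ k ih =>
    intro a j hj
    by_cases hjk : j < k
    · have hidx : k - 1 - j + 1 = k + 1 - 1 - j := by omega
      rw [pvWide, List.getElem?_append_left (by rw [pvWide_length]; omega), ih (a / 2) j hjk,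
        Nat.testBit_div_two, hidx]
    · have hjk' : j = k := by omega
      subst hjk'
      rw [pvWide]
      rw [show j + 1 - 1 - j = 0 by omega, Nat.testBit_zero]
      have hl : (pvWide j (a / 2)).length = j := pvWide_length j (a / 2)
      rw [show (pvWide j (a / 2) ++ [if a % 2 = 1 then '1' else '0'])[j]? =
          (pvWide j (a / 2) ++ [if a % 2 = 1 then '1' else '0'])[(pvWide j (a / 2)).length]? from by rw [hl],
        List.getElem?_concat_length]
      by_cases h2 : a % 2 = 1 <;> simp [h2]

theorem pvWide_chars (k : Nat) : ∀ (a : Nat), ∀ c ∈ pvWide k a, c = '0' ∨ c = '1' := by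
  induction k with
  | zero => intro a c hc; simp [pvWide] at hc
  | succ k ih =>
    intro a c hc
    rw [pvWide] at hc
    rcases List.mem_append.mp hc with hc | hc
    · exact ih (a / 2) c hc
    · simp only [List.mem_singleton] at hc
      subst hc
      split <;> simp

theorem pvPad_natBin_eq_wide (k : Nat) : ∀ a : Nat, a < 2 ^ k → pvPad k (pvNatBin a) = pvWide k a := by
  induction k with
  | zero =>
    intro a ha
    have : a = 0 := by omega
    subst this
    simp [pvPad, pvNatBin, pvWide]
  | succ k ih =>
    intro a ha
    by_cases h : a = 0
    · subst h
      have h0 : pvNatBin 0 = [] := by simp [pvNatBin]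
      have hw : pvWide k 0 = pvPad k (pvNatBin 0) := (ih 0 (Nat.two_pow_pos k)).symm
      rw [pvWide]
      simp only [Nat.zero_div, Nat.zero_mod, hw, h0, pvPad]
      simp [List.replicate_succ']
    · have hdiv : a / 2 < 2 ^ k := by
        have : 2 ^ (k + 1) = 2 * 2 ^ k := by ring
        omega
      have hstep : pvNatBin a = pvNatBin (a / 2) ++ [if a % 2 = 1 then '1' else '0'] := by
        rw [pvNatBin, dif_neg h]
      rw [pvWide, ← ih (a / 2) hdiv]
      unfold pvPad
      rw [hstep]
      simp only [List.length_append, List.length_singleton]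
      rw [show k + 1 - ((pvNatBin (a / 2)).length + 1) = k - (pvNatBin (a / 2)).length by omega]
      simp [List.append_assoc]

theorem pvVal_wide (k : Nat) : ∀ a : Nat, a < 2 ^ k → pvVal (pvWide k a) = a := by
  induction k with
  | zero =>
    intro a ha
    have : a = 0 := by omega
    subst this
    simp [pvWide, pvVal]
  | succ k ih =>
    intro a ha
    have hdiv : a / 2 < 2 ^ k := by
      have : 2 ^ (k + 1) = 2 * 2 ^ k := by ring
      omega
    rw [pvWide, pvVal_append_singleton, ih (a / 2) hdiv]
    have h2 : a % 2 = 0 ∨ a % 2 = 1 := by omega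
    rcases h2 with h2 | h2 <;> simp [h2, pvBinDigitVal] <;> omega

-- the copy loop, characterised elementwise
theorem pvLoop_getElem? (b_y : List Char) (is : List Int) :
    ∀ (bx : List Char), (∀ i ∈ is, 0 ≤ i ∧ i < (bx.length : Int)) → ∀ (j : Nat), j < bx.length →
    ((is.foldl (fun bx i => if PySem.List.pyGetD b_y i ' ' = '1' then PySem.List.pySetD bx i '1' else bx) bx))[j]?
      = if ((j : Int) ∈ is ∧ PySem.List.pyGetD b_y (j : Int) ' ' = '1') then some '1' else bx[j]? := by
  induction is with
  | nil => intro bx hin j hj; simp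
  | cons i is ih =>
    intro bx hin j hj
    have hi0 : 0 ≤ i := (hin i (by simp)).1
    have hi1 : i < (bx.length : Int) := (hin i (by simp)).2
    simp only [List.foldl_cons]
    set bx1 := if PySem.List.pyGetD b_y i ' ' = '1' then PySem.List.pySetD bx i '1' else bx with hbx1
    have hlen1 : bx1.length = bx.length := by
      rw [hbx1]
      split
      · rw [PySem.List.pySetD_of_nonneg _ _ hi0, List.length_set]
      · rfl
    have hin1 : ∀ i' ∈ is, 0 ≤ i' ∧ i' < (bx1.length : Int) := by
      intro i' hi'
      rw [hlen1]
      exact hin i' (by simp [hi'])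
    rw [ih bx1 hin1 j (by omega)]
    by_cases hmem : ((j : Int) ∈ is ∧ PySem.List.pyGetD b_y (j : Int) ' ' = '1')
    · rw [if_pos hmem, if_pos ⟨List.mem_cons_of_mem _ hmem.1, hmem.2⟩]
    · rw [if_neg hmem]
      by_cases hij : (j : Int) = i
      · by_cases hcj : PySem.List.pyGetD b_y (j : Int) ' ' = '1'
        · have hcondi : PySem.List.pyGetD b_y i ' ' = '1' := by rwa [hij] at hcj
          rw [if_pos ⟨by rw [List.mem_cons]; left; exact hij, hcj⟩, hbx1, if_pos hcondi,
            PySem.List.pySetD_of_nonneg _ _ hi0, List.getElem?_set, if_pos (by omega),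
            if_pos (by omega)]
        · have hcondi : ¬ PySem.List.pyGetD b_y i ' ' = '1' := by rwa [hij] at hcj
          rw [if_neg (fun hh => hcj hh.2), hbx1, if_neg hcondi]
      · have hrhs : ¬ (((j : Int) ∈ i :: is) ∧ PySem.List.pyGetD b_y (j : Int) ' ' = '1') := by
          rintro ⟨hm, hc⟩
          rcases List.mem_cons.mp hm with h' | h'
          · exact hij h'
          · exact hmem ⟨h', hc⟩
        rw [if_neg hrhs, hbx1]
        split
        · rw [PySem.List.pySetD_of_nonneg _ _ hi0, List.getElem?_set, if_neg (by omega)]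
        · rfl

theorem pvLoop_length (b_y : List Char) (is : List Int) :
    ∀ (bx : List Char), (∀ i ∈ is, 0 ≤ i) →
    ((is.foldl (fun bx i => if PySem.List.pyGetD b_y i ' ' = '1' then PySem.List.pySetD bx i '1' else bx) bx)).length = bx.length := by
  induction is with
  | nil => intro bx _; rfl
  | cons i is ih =>
    intro bx hpos
    simp only [List.foldl_cons]
    rw [ih _ (fun i' hi' => hpos i' (List.mem_cons_of_mem _ hi'))]
    split
    · rw [PySem.List.pySetD_of_nonneg _ _ (hpos i (by simp)), List.length_set]
    · rfl

theorem pvMask_testBit (a b k : Nat) (h : b ≤ a) :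
    (2 ^ a - 2 ^ b).testBit k = (decide (b ≤ k) && decide (k < a)) := by
  have h1 : 2 ^ a - 2 ^ b = (2 ^ (a - b) - 1) * 2 ^ b := by
    rw [Nat.sub_mul, one_mul, ← pow_add, Nat.sub_add_cancel h]
  rw [h1, Nat.testBit_mul_two_pow, Nat.testBit_two_pow_sub_one]
  by_cases hk : b ≤ k
  · simp only [hk, decide_true, Bool.true_and]
    by_cases hk2 : k < a <;> simp [hk2] <;> omega
  · simp [hk]

theorem pvRoundTrip (n : Int) (h : 0 ≤ n) : pvParseBin (pvFmt032 n) = n := by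
  unfold pvFmt032
  rw [if_neg (by omega)]
  rw [pvParseBin_eq_val _ (pvPad_natBin_chars 32 n.toNat), pvVal_pad, pvVal_natBin]
  rw [show Int.ofNat n.toNat = ((n.toNat : Int)) from rfl]
  omega

theorem pvRoundTripNeg (n : Int) (h : n < 0) : pvParseBin (pvFmt032 n) = n := by
  unfold pvFmt032
  rw [if_pos h]
  unfold pvParseBin
  rw [if_pos (by simp)]
  simp only [List.tail_cons]
  rw [show (pvPad 31 (pvNatBin (-n).toNat)).foldl (fun a c => a * 2 + pvBinDigitVal c) 0
      = pvVal (pvPad 31 (pvNatBin (-n).toNat)) from rfl, pvVal_pad, pvVal_natBin]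
  rw [show Int.ofNat (-n).toNat = (((-n).toNat : Int)) from rfl]
  omega

-- ===== VERDICT (by name: the statement is the Claim_ definition above) =====
theorem setSetBit_spec : Claim_equal_setSetBit := by
  intro x y l r hdom hpre
  simp only [pvDomInt, Dom_setSetBit, Bool.and_eq_true, decide_eq_true_eq] at hdom
  obtain ⟨⟨⟨hxd, hyd⟩, hld⟩, hrd⟩ := hdom
  unfold Spec_setSetBit
  simp only [setSetBit, setSetBit_alt]
  rcases hpre with hlt | ⟨hl1, hlr, hr32, hx0, hy0⟩
  · -- empty range: A round-trips x through the 32-character string, B returns x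
    rw [PySem.List.pyRange_one_eq_nil (by omega)]
    simp only [List.foldl_nil]
    rw [if_pos (by omega)]
    by_cases hx : x < 0
    · exact pvRoundTripNeg x hx
    · exact pvRoundTrip x (by omega)
  · rw [if_neg (by omega)]
    have h232 : (2 : Nat) ^ 32 = 4294967296 := by norm_num
    have hX32 : x.toNat < 2 ^ 32 := by omega
    have hY32 : y.toNat < 2 ^ 32 := by omega
    have hby : pvFmt032 y = pvWide 32 y.toNat := by
      unfold pvFmt032
      rw [if_neg (by omega), pvPad_natBin_eq_wide 32 _ hY32]
    have hbx : pvFmt032 x = pvWide 32 x.toNat := by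
      unfold pvFmt032
      rw [if_neg (by omega), pvPad_natBin_eq_wide 32 _ hX32]
    rw [hby, hbx]
    have hbnd : ∀ i ∈ PySem.List.pyRange (32 - r) (33 - l),
        0 ≤ i ∧ i < ((pvWide 32 x.toNat).length : Int) := by
      intro i hi
      rw [PySem.List.mem_pyRange_one] at hi
      rw [pvWide_length]
      omega
    have hv32 : x.toNat ||| (y.toNat &&& (2 ^ r.toNat - 2 ^ (l - 1).toNat)) < 2 ^ 32 :=
      Nat.or_lt_two_pow hX32 (lt_of_le_of_lt Nat.and_le_left hY32)
    have hloop : (PySem.List.pyRange (32 - r) (33 - l)).foldl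
        (fun bx i => if PySem.List.pyGetD (pvWide 32 y.toNat) i ' ' = '1'
          then PySem.List.pySetD bx i '1' else bx) (pvWide 32 x.toNat)
        = pvWide 32 (x.toNat ||| (y.toNat &&& (2 ^ r.toNat - 2 ^ (l - 1).toNat))) := by
      apply List.ext_getElem?
      intro j
      by_cases hj : j < 32
      · rw [pvLoop_getElem? _ _ _ hbnd j (by rw [pvWide_length]; omega)]
        rw [pvWide_getElem? 32 x.toNat j hj,
          pvWide_getElem? 32 (x.toNat ||| (y.toNat &&& (2 ^ r.toNat - 2 ^ (l - 1).toNat))) j hj]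
        rw [PySem.List.pyGetD_natCast, List.getD_eq_getElem?_getD, pvWide_getElem? 32 y.toNat j hj]
        simp only [Option.getD_some]
        have hmem_iff : ((j : Int) ∈ PySem.List.pyRange (32 - r) (33 - l))
            ↔ ((l - 1).toNat ≤ 32 - 1 - j ∧ 32 - 1 - j < r.toNat) := by
          rw [PySem.List.mem_pyRange_one]
          omega
        rw [Nat.testBit_lor, Nat.testBit_land, pvMask_testBit r.toNat ((l - 1).toNat) (32 - 1 - j) (by omega)]
        by_cases hd : (l - 1).toNat ≤ 32 - 1 - j ∧ 32 - 1 - j < r.toNat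
        · by_cases hbY : y.toNat.testBit (32 - 1 - j)
          · rw [if_pos ⟨hmem_iff.mpr hd, by simp [hbY]⟩]
            rw [decide_eq_true hd.1, decide_eq_true hd.2, hbY]
            simp
          · have hbY' : y.toNat.testBit (32 - 1 - j) = false := by simpa using hbY
            rw [if_neg (fun hh => by simp [hbY'] at hh), hbY']
            simp
        · rw [if_neg (fun hh => hd (hmem_iff.mp hh.1))]
          have hfalse : (decide ((l - 1).toNat ≤ 32 - 1 - j) && decide (32 - 1 - j < r.toNat)) = false := by
            by_cases h1 : (l - 1).toNat ≤ 32 - 1 - j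
            · have h2 : ¬ (32 - 1 - j < r.toNat) := fun h2 => hd ⟨h1, h2⟩
              rw [decide_eq_false h2, Bool.and_false]
            · rw [decide_eq_false h1, Bool.false_and]
          rw [hfalse]
          simp
      · rw [List.getElem?_eq_none (by rw [pvLoop_length _ _ _ (fun i hi => (hbnd i hi).1), pvWide_length]; omega),
          List.getElem?_eq_none (by rw [pvWide_length]; omega)]
    rw [hloop, pvParseBin_eq_val _ (pvWide_chars 32 _), pvVal_wide 32 _ hv32]
    have hxX : x = Int.ofNat x.toNat := by
      rw [show Int.ofNat x.toNat = ((x.toNat : Int)) from rfl]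
      omega
    have hyY : y = Int.ofNat y.toNat := by
      rw [show Int.ofNat y.toNat = ((y.toNat : Int)) from rfl]
      omega
    have hmask : ((2 : Int) ^ r.toNat - 2 ^ (l - 1).toNat)
        = Int.ofNat ((2 : Nat) ^ r.toNat - 2 ^ (l - 1).toNat) := by
      rw [show Int.ofNat ((2 : Nat) ^ r.toNat - 2 ^ (l - 1).toNat)
          = (((2 : Nat) ^ r.toNat - 2 ^ (l - 1).toNat : Nat) : Int) from rfl,
        Nat.cast_sub (Nat.pow_le_pow_right (by norm_num) (by omega))]
      push_cast
      ring
    rw [hxX, hyY, hmask]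
    rfl
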